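-- pv_equiv track=rewrite | github.com/pypi-data/pypi-mirror-62 | packages/selkie/selkie-0.21.5-py3-none-any.whl/seal/cld/corpus/token.py | _find_form
-- ===== SOURCE A (Python) =====
-- import os, unicodedata
--
-- def anyword (s):
--     for c in s:
--         if unicodedata.category(c)[0] in 'LMNS': return True
--     return False
--
-- def _find_form (parse, output):
--     first = last = None
--     for i in range(0, len(parse)-1):
--         s = output[parse[i][-1]:parse[i+1][-1]]
--         if anyword(s):
--             last = i
--             if first is None: first = i
--     if first is None: return None
--     else: return (first, last+1)
-- ===== SOURCE B (Python) =====
-- import unicodedata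
--
-- def anyword (s):
--     for c in s:
--         if unicodedata.category(c)[0] in 'LMNS': return True
--     return False
--
-- def _find_form (parse, output):
--     rng = range(0, len(parse)-1)
--     first = None
--     for i in rng:
--         if anyword(output[parse[i][-1]:parse[i+1][-1]]):
--             first = i
--             break
--     if first is None:
--         return None
--     for i in reversed(rng):
--         if anyword(output[parse[i][-1]:parse[i+1][-1]]):
--             return (first, i+1)
-- ===== Notes on version B (the rewrite author's own statement) =====
-- stated objective: alternative
-- what changed: Replaces A's single combined loop (which scans every segment maintaining first/last accumulators) with two separate early-exit scans: a forward scan that breaks at the first matching segment and a backward scan over the reversed range that breaks at the last one.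
import Mathlib
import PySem

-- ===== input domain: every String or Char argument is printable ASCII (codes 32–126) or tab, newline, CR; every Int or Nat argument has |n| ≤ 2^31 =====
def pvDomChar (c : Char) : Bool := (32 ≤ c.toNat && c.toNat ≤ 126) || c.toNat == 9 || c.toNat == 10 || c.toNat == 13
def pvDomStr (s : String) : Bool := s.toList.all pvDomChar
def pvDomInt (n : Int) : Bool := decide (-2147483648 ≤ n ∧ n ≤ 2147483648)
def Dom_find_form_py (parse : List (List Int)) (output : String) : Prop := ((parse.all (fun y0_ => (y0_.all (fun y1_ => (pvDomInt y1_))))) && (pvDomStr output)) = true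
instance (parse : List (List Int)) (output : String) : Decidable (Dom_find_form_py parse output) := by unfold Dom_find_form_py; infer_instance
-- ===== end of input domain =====

-- B replaces A's single accumulator loop over all segments by two early-exit scans
-- (forward for 'first', backward for 'last'); objective: alternative decomposition, same cost.

-- ===== PORT A =====
-- unicodedata.category(c)[0] ∈ 'LMNS': exact on the Dom alphabet (printable ASCII + tab/newline/CR),
-- where the word categories are exactly letters, digits and the symbols $+<=>^`|~.
def isWordChar (c : Char) : Bool :=
  c.isAlpha || ('0' ≤ c && c ≤ '9') ||
    (c == '$' || c == '+' || c == '<' || c == '=' || c == '>' || c == '^' || c == '`' || c == '|' || c == '~')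

-- anyword(s): scan the characters, True at the first word-category character.
def anyword : List Char → Bool
  | [] => false
  | c :: rest => if isWordChar c then true else anyword rest

-- parse[i][-1]; Python raises IndexError on an empty inner list — Pre_ excludes that,
-- so the .getD 0 default is never reached on admitted inputs.
def segLast (parse : List (List Int)) (i : Int) : Int :=
  (PySem.List.pyGet? ((PySem.List.pyGet? parse i).getD []) (-1)).getD 0

-- anyword(output[parse[i][-1]:parse[i+1][-1]])
def segWord (parse : List (List Int)) (output : String) (i : Int) : Bool :=
  anyword (PySem.List.slice output.toList (some (segLast parse i)) (some (segLast parse (i + 1))))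

def find_form_py (parse : List (List Int)) (output : String) : Option (Int × Int) :=
  let r := (PySem.List.pyRange 0 ((parse.length : Int) - 1) 1).foldl
    (fun (st : Option Int × Option Int) (i : Int) =>
      if segWord parse output i then
        ((if st.1 = none then some i else st.1), some i)
      else st)
    (none, none)
  match r.1, r.2 with
  | some f, some l => some (f, l + 1)
  | _, _ => none

-- ===== PORT B =====
-- the forward/backward 'for … break' loops of Source B: first index of the list satisfying p.
def scanFirst (p : Int → Bool) : List Int → Option Int
  | [] => none
  | i :: rest => if p i then some i else scanFirst p rest

def find_form_py_alt (parse : List (List Int)) (output : String) : Option (Int × Int) :=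
  let rng := PySem.List.pyRange 0 ((parse.length : Int) - 1) 1
  match scanFirst (segWord parse output) rng with
  | none => none
  | some f =>
    match scanFirst (segWord parse output) rng.reverse with
    | some l => some (f, l + 1)
    | none => none   -- unreachable: the backward loop always finds a match when the forward one did

-- ===== PRECONDITION & SPEC =====
-- Pre_ excludes exactly the inputs on which Python A raises IndexError:
-- two or more segments with some inner list empty (parse[i][-1] then fails).
def Pre_find_form_py (parse : List (List Int)) (output : String) : Prop :=
  parse.length ≤ 1 ∨ ∀ l ∈ parse, l ≠ []
instance (parse : List (List Int)) (output : String) : Decidable (Pre_find_form_py parse output) := by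
  unfold Pre_find_form_py; infer_instance
def pvWitness_find_form_py : List (List Int) × String := ([[0], [3]], "abc")

def Spec_find_form_py (parse : List (List Int)) (output : String) (out : Option (Int × Int)) : Prop := out = find_form_py_alt parse output
instance (parse : List (List Int)) (output : String) (out : Option (Int × Int)) : Decidable (Spec_find_form_py parse output out) := by unfold Spec_find_form_py; infer_instance

-- ===== CLAIM (what is proved, stated in full; the proofs are below) =====
def Claim_equal_find_form_py : Prop := ∀ (parse : List (List Int)) (output : String), Dom_find_form_py parse output → Pre_find_form_py parse output → Spec_find_form_py parse output (find_form_py parse output)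

-- ===== LEMMAS AND PROOFS =====

theorem scanFirst_eq_none {p : Int → Bool} {l : List Int} :
    scanFirst p l = none ↔ ∀ i ∈ l, p i = false := by
  induction l with
  | nil => simp [scanFirst]
  | cons a t ih =>
    by_cases h : p a <;> simp [scanFirst, h, ih]

theorem fold_fst (p : Int → Bool) (l : List Int) (f l0 : Option Int) :
    ((l.foldl (fun (st : Option Int × Option Int) (i : Int) =>
        if p i then ((if st.1 = none then some i else st.1), some i) else st) (f, l0)).1)
      = (match f with | some x => some x | none => scanFirst p l) := by
  induction l generalizing f l0 with
  | nil => cases f <;> simp [scanFirst]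
  | cons a t ih =>
    by_cases h : p a
    · cases f <;> simp [h, scanFirst, ih]
    · cases f <;> simp [h, scanFirst, ih]

theorem scanFirst_append (p : Int → Bool) (l1 l2 : List Int) :
    scanFirst p (l1 ++ l2)
      = (match scanFirst p l1 with | some x => some x | none => scanFirst p l2) := by
  induction l1 with
  | nil => simp [scanFirst]
  | cons b r ih => by_cases hb : p b <;> simp [scanFirst, hb, ih]

theorem fold_snd (p : Int → Bool) (l : List Int) (f l0 : Option Int) :
    ((l.foldl (fun (st : Option Int × Option Int) (i : Int) =>
        if p i then ((if st.1 = none then some i else st.1), some i) else st) (f, l0)).2)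
      = (match scanFirst p l.reverse with | some x => some x | none => l0) := by
  induction l generalizing f l0 with
  | nil => simp [scanFirst]
  | cons a t ih =>
    rw [show (a :: t).reverse = t.reverse ++ [a] from by simp, scanFirst_append]
    by_cases h : p a
    · simp only [List.foldl_cons, if_pos h, ih]
      cases hc : scanFirst p t.reverse <;> simp [hc, scanFirst, h]
    · simp only [List.foldl_cons, if_neg h, ih]
      cases hc : scanFirst p t.reverse <;> simp [hc, scanFirst, h]

theorem scanFirst_reverse_none {p : Int → Bool} {l : List Int} :
    scanFirst p l.reverse = none ↔ scanFirst p l = none := by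
  rw [scanFirst_eq_none, scanFirst_eq_none]
  constructor <;> intro h i hi <;> exact h i (by simpa using hi)

-- ===== VERDICT (by name: the statement is the Claim_ definition above) =====
theorem find_form_py_spec : Claim_equal_find_form_py := by
  intro parse output _ _
  unfold Spec_find_form_py find_form_py find_form_py_alt
  simp only [fold_fst, fold_snd]
  cases hf : scanFirst (segWord parse output) (PySem.List.pyRange 0 ((parse.length : Int) - 1) 1) with
  | none =>
    have hr := scanFirst_reverse_none.mpr hf
    simp [hf, hr]
  | some f =>
    cases hr : scanFirst (segWord parse output)
        (PySem.List.pyRange 0 ((parse.length : Int) - 1) 1).reverse with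
    | none => exact absurd (scanFirst_reverse_none.mp hr) (by simp [hf])
    | some l => simp [hf, hr]
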